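-- pv_equiv track=rewrite | github.com/JpSoares17/Mural | tabelavendas.py | maior_vendedor_ano
-- ===== SOURCE A (Python) =====
-- def fabricante(linha):
--     fabricantes = ('Fiat', 'Ford', 'GM', 'Wolkswagen')
--     return fabricantes[linha]
--
-- def maior_vendedor_ano(tabela, ano):
--     maior = 0
--     linha = 0
--     for i_linha in range(len(tabela)):
--         for i_coluna in range(len(tabela[i_linha])):
--             if (i_coluna == (ano-2013)) and (
--                     tabela[i_linha][i_coluna] > maior):
--                 maior = tabela[i_linha][i_coluna]
--                 linha = i_linha
--     fabricante_selecionado = fabricante(linha)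
--     return fabricante_selecionado, maior
-- ===== SOURCE B (Python) =====
-- def maior_vendedor_ano(tabela, ano):
--     fabricantes = ('Fiat', 'Ford', 'GM', 'Wolkswagen')
--     col = ano - 2013
--     vals = [row[col] if 0 <= col < len(row) else 0 for row in tabela]
--     maior = max([0] + vals)
--     linha = vals.index(maior) if maior > 0 else 0
--     return fabricantes[linha], maior
-- ===== Notes on version B (the rewrite author's own statement) =====
-- stated objective: alternative
-- what changed: B is staged instead of a nested accumulator loop: it builds the list of per-row values at column ano-2013 (0 when out of range), then takes the maximum of that list and locates the winning row with list.index, eliminating A's inner scan over every column.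
import Mathlib
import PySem

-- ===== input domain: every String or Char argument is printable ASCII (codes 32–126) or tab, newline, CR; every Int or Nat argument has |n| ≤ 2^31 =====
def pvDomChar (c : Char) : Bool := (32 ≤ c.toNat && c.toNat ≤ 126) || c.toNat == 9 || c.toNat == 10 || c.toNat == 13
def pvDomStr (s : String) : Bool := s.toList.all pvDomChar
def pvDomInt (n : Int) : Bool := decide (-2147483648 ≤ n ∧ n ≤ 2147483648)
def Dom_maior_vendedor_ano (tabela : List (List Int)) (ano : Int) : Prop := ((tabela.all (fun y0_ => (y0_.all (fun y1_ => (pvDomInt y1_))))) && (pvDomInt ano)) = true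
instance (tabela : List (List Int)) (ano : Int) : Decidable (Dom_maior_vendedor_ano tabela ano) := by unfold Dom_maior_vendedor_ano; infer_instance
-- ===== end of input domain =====

-- B replaces A's nested accumulator loop by a staged computation: per-row values at column
-- ano-2013, then max, then list.index of the winner (objective: alternative decomposition).

-- ===== PORT A =====
-- fabricantes[linha]: pyGet? is none exactly where Python raises IndexError (both Pythons raise on the same inputs).
def maior_vendedor_ano (tabela : List (List Int)) (ano : Int) : String × Int :=
  let st : Int × Int :=
    (List.range tabela.length).foldl (fun (s : Int × Int) (i_linha : Nat) =>
      let row := tabela[i_linha]!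
      (List.range row.length).foldl (fun (s : Int × Int) (i_coluna : Nat) =>
        if (i_coluna : Int) = ano - 2013 ∧ row[i_coluna]! > s.1
        then (row[i_coluna]!, (i_linha : Int)) else s) s) (0, 0)
  ((PySem.List.pyGet? (["Fiat", "Ford", "GM", "Wolkswagen"] : List String) st.2).getD "", st.1)

-- ===== PORT B =====
def maior_vendedor_ano_alt (tabela : List (List Int)) (ano : Int) : String × Int :=
  let col := ano - 2013
  let vals : List Int := tabela.map (fun row =>
    if 0 ≤ col ∧ col < (row.length : Int) then row[col.toNat]! else 0)
  let maior : Int := (PySem.List.max? ((0 : Int) :: vals) (fun y => y)).getD 0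
  let linha : Int := if maior > 0 then (((PySem.List.index? vals maior).getD 0 : Nat) : Int) else 0
  ((PySem.List.pyGet? (["Fiat", "Ford", "GM", "Wolkswagen"] : List String) linha).getD "", maior)

-- ===== PRECONDITION & SPEC =====
-- Both Pythons raise IndexError on fabricantes[linha] exactly when the winning row index is ≥ 4;
-- the ports agree everywhere, so no Pre_ is needed.
def Spec_maior_vendedor_ano (tabela : List (List Int)) (ano : Int) (out : String × Int) : Prop := out = maior_vendedor_ano_alt tabela ano
instance (tabela : List (List Int)) (ano : Int) (out : String × Int) : Decidable (Spec_maior_vendedor_ano tabela ano out) := by unfold Spec_maior_vendedor_ano; infer_instance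

-- ===== CLAIM (what is proved, stated in full; the proofs are below) =====
def Claim_equal_maior_vendedor_ano : Prop := ∀ (tabela : List (List Int)) (ano : Int), Dom_maior_vendedor_ano tabela ano → Spec_maior_vendedor_ano tabela ano (maior_vendedor_ano tabela ano)

-- ===== LEMMAS AND PROOFS =====

-- A's inner column scan updates at most once: at i_coluna = c (if in range and beating s.1).
theorem pv_inner (n : Nat) (c : Int) (f : Nat → Int) (i : Int) (s : Int × Int) :
    (List.range n).foldl (fun (s : Int × Int) (k : Nat) => if (k : Int) = c ∧ f k > s.1 then (f k, i) else s) s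
      = if 0 ≤ c ∧ c.toNat < n ∧ f c.toNat > s.1 then (f c.toNat, i) else s := by
  induction n with
  | zero =>
    simp only [List.range_zero, List.foldl_nil]
    rw [if_neg (by omega)]
  | succ m ih =>
    rw [List.range_succ, List.foldl_append, ih]
    simp only [List.foldl_cons, List.foldl_nil]
    by_cases hc : (m : Int) = c
    · have hm : c.toNat = m := by omega
      rw [hm]
      have hss : (if 0 ≤ c ∧ m < m ∧ f m > s.1 then (f m, i) else s) = s := if_neg (by omega)
      rw [hss]
      split_ifs <;> first | rfl | (exfalso; omega)
    · rw [if_neg (fun h => hc h.1)]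
      split_ifs <;> first | rfl | (exfalso; omega)

-- The single-update row step A performs per row (proof-side abbreviation only).
def pvStep (c : Int) (row : List Int) (i : Int) (s : Int × Int) : Int × Int :=
  if 0 ≤ c ∧ c.toNat < row.length ∧ row[c.toNat]! > s.1 then (row[c.toNat]!, i) else s

-- The per-row value B builds (proof-side abbreviation only).
def pvVal (c : Int) (row : List Int) : Int :=
  if 0 ≤ c ∧ c < (row.length : Int) then row[c.toNat]! else 0

theorem pv_outer (c : Int) (l : List (List Int)) (start : Nat) (s : Int × Int) :
    (List.range l.length).foldl (fun (s : Int × Int) (k : Nat) => pvStep c l[k]! ((start : Int) + k) s) s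
      = (PySem.List.enumerate l (start : Int)).foldl (fun s p => pvStep c p.2 p.1 s) s := by
  induction l generalizing start s with
  | nil => simp [PySem.List.enumerate_nil]
  | cons x xs ih =>
    rw [PySem.List.enumerate_cons, List.foldl_cons]
    simp only [List.length_cons, List.range_succ_eq_map, List.foldl_cons, List.foldl_map,
      List.getElem!_cons_zero, List.getElem!_cons_succ, Nat.cast_zero, add_zero, Nat.cast_succ]
    have hfun : (fun (s : Int × Int) (y : Nat) => pvStep c xs[y]! ((start : Int) + (↑y + 1)) s)
        = fun (s : Int × Int) (y : Nat) => pvStep c xs[y]! (((start + 1 : Nat) : Int) + ↑y) s := by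
      funext s y
      have : (start : Int) + (↑y + 1) = ((start + 1 : Nat) : Int) + ↑y := by push_cast; ring
      rw [this]
    rw [hfun, ih (start + 1) (pvStep c x (start : Int) s)]
    push_cast
    rfl

-- Given a nonnegative running maximum, A's per-row step only looks at pvVal.
theorem pv_step_val (c : Int) (row : List Int) (i : Int) (s : Int × Int) (hs : 0 ≤ s.1) :
    pvStep c row i s = if pvVal c row > s.1 then (pvVal c row, i) else s := by
  unfold pvStep pvVal
  by_cases h : 0 ≤ c ∧ c < (row.length : Int)
  · have hn : c.toNat < row.length := by omega
    rw [if_pos h]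
    split_ifs <;> first | rfl | (exfalso; omega)
  · rw [if_neg h]
    have hA : ¬ (0 ≤ c ∧ c.toNat < row.length ∧ row[c.toNat]! > s.1) := by
      intro ⟨h1, h2, _⟩; exact h ⟨h1, by omega⟩
    rw [if_neg hA, if_neg (by omega)]

-- A's row loop over tabela equals the same loop over B's value list.
theorem pv_bridge (c : Int) (l : List (List Int)) (start : Int) (s : Int × Int) (hs : 0 ≤ s.1) :
    (PySem.List.enumerate l start).foldl (fun s p => pvStep c p.2 p.1 s) s
      = (PySem.List.enumerate (l.map (pvVal c)) start).foldl
          (fun (s : Int × Int) p => if p.2 > s.1 then (p.2, p.1) else s) s := by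
  induction l generalizing start s with
  | nil => simp [PySem.List.enumerate_nil]
  | cons x xs ih =>
    rw [List.map_cons, PySem.List.enumerate_cons, PySem.List.enumerate_cons,
      List.foldl_cons, List.foldl_cons, pv_step_val c x start s hs]
    by_cases h : pvVal c x > s.1
    · rw [if_pos h]; exact ih (start + 1) _ (by simpa using le_of_lt (lt_of_le_of_lt hs h))
    · rw [if_neg h]; exact ih (start + 1) s hs

-- The running maximum lands on the seed or in the list.
theorem pv_foldl_max_mem (l : List Int) (a : Int) : l.foldl max a = a ∨ l.foldl max a ∈ l := by
  induction l generalizing a with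
  | nil => exact Or.inl rfl
  | cons x t ih =>
    rw [List.foldl_cons]
    rcases ih (max a x) with h | h
    · rcases max_choice a x with h2 | h2 <;> rw [h, h2]
      · exact Or.inl rfl
      · exact Or.inr (List.mem_cons_self)
    · exact Or.inr (List.mem_cons_of_mem _ h)

theorem pv_le_foldl_max (l : List Int) (a : Int) : a ≤ l.foldl max a := by
  induction l generalizing a with
  | nil => exact le_refl a
  | cons x t ih => exact le_trans (le_max_left a x) (ih (max a x))

-- Characterisation of the strict-update loop: it computes the running max and the first index
-- attaining it (when it beats the initial value).
theorem pv_loop_char (vals : List Int) (start m l : Int) (hm : 0 ≤ m) :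
    (PySem.List.enumerate vals start).foldl
        (fun (s : Int × Int) p => if p.2 > s.1 then (p.2, p.1) else s) (m, l)
      = (vals.foldl max m,
         if vals.foldl max m > m
         then start + (((PySem.List.index? vals (vals.foldl max m)).getD 0 : Nat) : Int)
         else l) := by
  induction vals generalizing start m l with
  | nil =>
    rw [PySem.List.enumerate_nil]
    simp only [List.foldl_nil]
    rw [if_neg (by omega)]
  | cons v rest ih =>
    rw [PySem.List.enumerate_cons, List.foldl_cons]
    simp only [List.foldl_cons]
    by_cases hv : v > m
    · rw [if_pos hv]
      rw [ih (start + 1) v start (by omega)]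
      have hmv : max m v = v := max_eq_right (le_of_lt hv)
      rw [hmv]
      set M := rest.foldl max v with hM
      have hvM : v ≤ M := pv_le_foldl_max rest v
      have hMm : M > m := lt_of_lt_of_le hv hvM
      rw [if_pos hMm]
      by_cases hMv : M > v
      · have hne : v ≠ M := by omega
        have hmem : M ∈ rest := by
          rcases pv_foldl_max_mem rest v with h | h
          · exfalso; omega
          · exact h
        rw [if_pos hMv, PySem.List.index?_cons_of_ne _ hne]
        rcases (PySem.List.index?_isSome_iff rest M).mpr hmem with hsome
        rcases Option.isSome_iff_exists.mp hsome with ⟨k, hk⟩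
        rw [hk]
        simp only [Option.map_some, Option.getD_some]
        push_cast
        rw [Prod.mk.injEq]
        exact ⟨rfl, by ring⟩
      · have hveq : M = v := le_antisymm (by omega) hvM
        rw [if_neg hMv, hveq, PySem.List.index?_cons_self]
        simp
    · rw [if_neg hv]
      rw [ih (start + 1) m l hm]
      have hmv : max m v = m := max_eq_left (by omega)
      rw [hmv]
      set M := rest.foldl max m with hM
      by_cases hMm : M > m
      · have hvne : v ≠ M := by omega
        have hmem : M ∈ rest := by
          rcases pv_foldl_max_mem rest m with h | h
          · exfalso; omega
          · exact h
        rw [if_pos hMm, if_pos hMm, PySem.List.index?_cons_of_ne _ hvne]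
        rcases Option.isSome_iff_exists.mp ((PySem.List.index?_isSome_iff rest M).mpr hmem) with ⟨k, hk⟩
        rw [hk]
        simp only [Option.map_some, Option.getD_some]
        push_cast
        rw [Prod.mk.injEq]
        exact ⟨rfl, by ring⟩
      · rw [if_neg hMm, if_neg hMm]

-- ===== VERDICT (by name: the statement is the Claim_ definition above) =====
theorem maior_vendedor_ano_spec : Claim_equal_maior_vendedor_ano := by
  intro tabela ano _
  unfold Spec_maior_vendedor_ano maior_vendedor_ano maior_vendedor_ano_alt
  dsimp only
  have hA : (fun (s : Int × Int) (i_linha : Nat) =>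
        let row := tabela[i_linha]!
        (List.range row.length).foldl (fun (s : Int × Int) (i_coluna : Nat) =>
          if (i_coluna : Int) = ano - 2013 ∧ row[i_coluna]! > s.1
          then (row[i_coluna]!, (i_linha : Int)) else s) s)
      = fun (s : Int × Int) (k : Nat) => pvStep (ano - 2013) tabela[k]! (((0 : Nat) : Int) + (k : Int)) s := by
    funext s k
    dsimp only
    rw [pv_inner, pvStep]
    norm_num
  rw [hA, pv_outer (ano - 2013) tabela 0 (0, 0)]
  rw [pv_bridge (ano - 2013) tabela ((0 : Nat) : Int) (0, 0) (le_refl 0)]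
  have hmap : tabela.map (fun row =>
      if 0 ≤ ano - 2013 ∧ ano - 2013 < (row.length : Int) then row[(ano - 2013).toNat]! else 0)
      = tabela.map (pvVal (ano - 2013)) := by
    simp [pvVal]
  rw [hmap] at *
  rw [pv_loop_char (tabela.map (pvVal (ano - 2013))) ((0 : Nat) : Int) 0 0 (le_refl 0)]
  rw [PySem.List.max?_id_cons]
  simp
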